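-- pv_equiv track=rewrite | github.com/M4p4ch3/adventOfCode | 2022/06TuningTrouble/main2.py | check_dupl_char
-- ===== SOURCE A (Python) =====
-- from typing import List
--
-- def check_dupl_char(buf: List) -> bool:
--     """
--     Check for dupl char in buf
--
--     Args:
--         buf (List): Buf to check for dupl char
--
--     Returns:
--         bool: True if dupl char in buf, False otherwise
--     """
--
--     for (char_idx, char) in enumerate(buf):
--
--         for (char_idx_2, char_2) in enumerate(buf):
--
--             if char_idx == char_idx_2:
--                 continue
--
--             if char == char_2:
--                 return True
--
--     return False
-- ===== SOURCE B (Python) =====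
-- from typing import List
--
-- def check_dupl_char(buf: List) -> bool:
--     """
--     Check for dupl char in buf
--
--     Args:
--         buf (List): Buf to check for dupl char
--
--     Returns:
--         bool: True if dupl char in buf, False otherwise
--     """
--     return len(set(buf)) != len(buf)
-- ===== Notes on version B (the rewrite author's own statement) =====
-- stated objective: simpler
-- what changed: Replaces the nested enumerate loops with early return by building the set of elements once and comparing its cardinality to the list length.
import Mathlib
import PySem

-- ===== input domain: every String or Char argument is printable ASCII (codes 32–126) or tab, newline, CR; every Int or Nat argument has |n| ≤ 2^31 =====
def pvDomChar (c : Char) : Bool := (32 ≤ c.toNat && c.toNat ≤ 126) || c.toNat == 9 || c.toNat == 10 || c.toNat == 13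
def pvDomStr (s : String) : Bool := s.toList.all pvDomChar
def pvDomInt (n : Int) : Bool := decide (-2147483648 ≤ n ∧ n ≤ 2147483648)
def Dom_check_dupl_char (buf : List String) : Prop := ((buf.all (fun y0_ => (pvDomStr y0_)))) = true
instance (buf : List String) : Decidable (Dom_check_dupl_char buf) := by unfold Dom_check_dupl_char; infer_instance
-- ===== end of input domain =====

-- B replaces A's quadratic pairwise index scan by building the set of elements once
-- and comparing its size with the list's length (objective: simpler).

-- ===== PORT A =====
-- A: for each (i, char) in enumerate(buf), for each (j, char2) in enumerate(buf),
-- skip i == j, return True on char == char2; finally False. Early return = List.any.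
def check_dupl_char (buf : List String) : Bool :=
  (PySem.List.enumerate buf 0).any (fun p =>
    (PySem.List.enumerate buf 0).any (fun q =>
      if p.1 == q.1 then false else p.2 == q.2))

-- ===== PORT B =====
-- B: len(set(buf)) != len(buf)
def check_dupl_char_alt (buf : List String) : Bool :=
  PySem.Set.len (PySem.Set.ofList buf) != PySem.List.len buf

-- ===== PRECONDITION & SPEC =====
def Spec_check_dupl_char (buf : List String) (out : Bool) : Prop := out = check_dupl_char_alt buf
instance (buf : List String) (out : Bool) : Decidable (Spec_check_dupl_char buf out) := by unfold Spec_check_dupl_char; infer_instance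

-- ===== CLAIM (what is proved, stated in full; the proofs are below) =====
def Claim_equal_check_dupl_char : Prop := ∀ (buf : List String), Dom_check_dupl_char buf → Spec_check_dupl_char buf (check_dupl_char buf)

-- ===== LEMMAS AND PROOFS =====

-- A returns true exactly on lists with a duplicate (two distinct positions, equal values)
theorem check_dupl_char_eq_true_iff (buf : List String) :
    check_dupl_char buf = true ↔ ¬ buf.Nodup := by
  simp only [check_dupl_char, List.any_eq_true, PySem.List.mem_enumerate_iff]
  constructor
  · rintro ⟨p, ⟨i, hi, rfl⟩, q, ⟨j, hj, rfl⟩, hq⟩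
    simp only [zero_add] at hq
    split_ifs at hq with h
    intro hnd
    have hij : i ≠ j := fun e => h (by simp [e])
    have hq' : buf[i] = buf[j] := by simpa using hq
    exact hij ((List.Nodup.getElem_inj_iff hnd).mp hq')
  · intro h
    rw [List.nodup_iff_injective_get] at h
    simp only [Function.Injective, not_forall] at h
    obtain ⟨i, j, he, hne⟩ := h
    refine ⟨(0 + (i : Int), buf[i]), ⟨i, i.isLt, rfl⟩, (0 + (j : Int), buf[j]), ⟨j, j.isLt, rfl⟩, ?_⟩
    have hij : (i : Nat) ≠ (j : Nat) := fun e => hne (Fin.ext e)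
    have hge : buf[(i : Nat)] = buf[(j : Nat)] := by simpa [List.get_eq_getElem] using he
    simp [hij, hge]

-- B returns true exactly on lists with a duplicate
theorem check_dupl_char_alt_eq_true_iff (buf : List String) :
    check_dupl_char_alt buf = true ↔ ¬ buf.Nodup := by
  have hF : (PySem.Set.ofList buf).toFinset = buf.toFinset := by
    ext a; simp [PySem.Set.mem_ofList]
  have hl : (PySem.Set.ofList buf).length = buf.toFinset.card := by
    rw [← hF]; exact (List.toFinset_card_of_nodup (PySem.Set.nodup_ofList buf)).symm
  have hle := List.toFinset_card_le (l := buf)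
  have hiff : buf.toFinset.card = buf.length ↔ buf.Nodup :=
    Multiset.toFinset_card_eq_card_iff_nodup
  simp only [check_dupl_char_alt, PySem.Set.len, PySem.List.len_eq, bne_iff_ne, ne_eq,
    Int.natCast_inj, hl]
  tauto

-- ===== VERDICT (by name: the statement is the Claim_ definition above) =====
theorem check_dupl_char_spec : Claim_equal_check_dupl_char := by
  intro buf _
  unfold Spec_check_dupl_char
  rw [Bool.eq_iff_iff, check_dupl_char_eq_true_iff, check_dupl_char_alt_eq_true_iff]
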